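-- pv_equiv track=rewrite | github.com/michaelodusami/py-dsa-mooc | main.py | listSplitsMyAlg
-- ===== SOURCE A (Python) =====
-- def listSplitsMyAlg(aList: list):
--     n = len(aList)
--     ways = 0
--     for i in range(1, n):
--         firstHalf = sum(aList[0:i])
--         secondHalf = sum(aList[i:])
--         if firstHalf == secondHalf:
--             ways += 1
--
--     return ways
-- ===== SOURCE B (Python) =====
-- def listSplitsMyAlg(aList: list):
--     total = sum(aList)
--     ways = 0
--     left = 0
--     for x in aList[:-1]:
--         left += x
--         if 2 * left == total:
--             ways += 1
--     return ways
-- ===== Notes on version B (the rewrite author's own statement) =====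
-- stated objective: faster
-- what changed: Replaces the per-split re-summation of both slices by one pass keeping a running prefix sum compared against the precomputed total.
import Mathlib
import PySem

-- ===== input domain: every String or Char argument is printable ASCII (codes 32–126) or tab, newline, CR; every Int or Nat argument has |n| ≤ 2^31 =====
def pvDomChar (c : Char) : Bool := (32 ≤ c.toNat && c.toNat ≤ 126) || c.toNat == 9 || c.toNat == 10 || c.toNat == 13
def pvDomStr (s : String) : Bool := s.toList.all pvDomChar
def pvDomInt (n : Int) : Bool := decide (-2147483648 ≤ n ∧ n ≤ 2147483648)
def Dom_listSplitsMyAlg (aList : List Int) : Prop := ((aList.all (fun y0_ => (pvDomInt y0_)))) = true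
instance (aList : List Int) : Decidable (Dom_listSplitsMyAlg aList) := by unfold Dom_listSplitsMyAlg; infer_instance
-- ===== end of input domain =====

-- B replaces A's per-split re-summation of both slices by a single pass with a
-- running prefix sum compared against the precomputed total (O(n) vs O(n^2)).

-- ===== PORT A =====
def listSplitsMyAlg (aList : List Int) : Int :=
  let n : Int := aList.length
  (PySem.List.pyRange 1 n 1).foldl (fun ways i =>
    let firstHalf := (PySem.List.slice aList (some 0) (some i)).sum
    let secondHalf := (PySem.List.slice aList (some i) none).sum
    if firstHalf == secondHalf then ways + 1 else ways) 0

-- ===== PORT B =====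
def listSplitsMyAlg_alt (aList : List Int) : Int :=
  let total := aList.sum
  let st := (PySem.List.slice aList none (some (-1))).foldl
    (fun (st : Int × Int) x =>
      let left := st.2 + x
      (if 2 * left == total then st.1 + 1 else st.1, left)) (0, 0)
  st.1

-- ===== PRECONDITION & SPEC =====
def Spec_listSplitsMyAlg (aList : List Int) (out : Int) : Prop := out = listSplitsMyAlg_alt aList
instance (aList : List Int) (out : Int) : Decidable (Spec_listSplitsMyAlg aList out) := by unfold Spec_listSplitsMyAlg; infer_instance

-- ===== CLAIM (what is proved, stated in full; the proofs are below) =====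
def Claim_equal_listSplitsMyAlg : Prop := ∀ (aList : List Int), Dom_listSplitsMyAlg aList → Spec_listSplitsMyAlg aList (listSplitsMyAlg aList)

-- ===== LEMMAS AND PROOFS =====

-- B's loop with accumulator (ways, left): ways grows by the count of prefixes of l
-- (continuing from `left`) whose doubled sum equals `total`.
theorem altLoop_eq (total : Int) (l : List Int) (w left : Int) :
    (l.foldl (fun (st : Int × Int) x =>
      let lf := st.2 + x
      (if 2 * lf == total then st.1 + 1 else st.1, lf)) (w, left)).1
    = w + ((List.range l.length).countP
        (fun j => 2 * (left + (l.take (j+1)).sum) == total) : Int) := by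
  induction l generalizing w left with
  | nil => simp
  | cons x s ih =>
    simp only [List.foldl_cons]
    rw [ih]
    have hpred : ((fun j => 2 * (left + ((x :: s).take (j+1)).sum) == total) ∘ Nat.succ)
        = (fun j => 2 * ((left + x) + (s.take (j+1)).sum) == total) := by
      funext j; simp [List.take_succ_cons, add_assoc]
    simp only [List.length_cons, List.range_succ_eq_map, List.countP_cons,
      List.countP_map, hpred]
    by_cases h : 2 * (left + x) = total <;>
      first
        | (simp [h, List.take_succ_cons]; omega)
        | simp [h, List.take_succ_cons]

-- A's condition at split i = j+1, rewritten through the total sum.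
theorem cond_eq (aList : List Int) (j : Nat) :
    ((aList.take (j+1)).sum == (aList.drop (j+1)).sum)
    = (2 * ((aList.take (j+1)).sum) == aList.sum) := by
  have hs := List.sum_take_add_sum_drop aList (j+1)
  rw [Bool.eq_iff_iff]
  simp only [beq_iff_eq]
  omega

theorem listSplitsMyAlg_spec : Claim_equal_listSplitsMyAlg := by
  unfold Claim_equal_listSplitsMyAlg Spec_listSplitsMyAlg
  intro aList _
  unfold listSplitsMyAlg listSplitsMyAlg_alt
  simp only [PySem.List.slice_to_neg_one]
  rw [altLoop_eq]
  rw [PySem.List.pyRange_one]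
  rw [List.foldl_map]
  rw [PySem.List.foldl_if_add_one
    (p := fun k : Nat =>
      (PySem.List.slice aList (some 0) (some (1 + (k : Int)))).sum ==
        (PySem.List.slice aList (some (1 + (k : Int))) none).sum)]
  have hlen : ((aList.length : Int) - 1).toNat = aList.dropLast.length := by
    simp [List.length_dropLast]
  rw [hlen]
  congr 1
  congr 1
  apply List.countP_congr
  intro j hj
  have hjlt : j < aList.dropLast.length := List.mem_range.mp hj
  have hcast : (1 : Int) + (j : Int) = ((j + 1 : Nat) : Int) := by push_cast; ring
  rw [hcast, PySem.List.slice_zero_start, PySem.List.slice_to_natCast,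
    PySem.List.slice_from_natCast, cond_eq]
  have htake : aList.dropLast.take (j+1) = aList.take (j+1) := by
    rw [List.dropLast_eq_take, List.take_take]
    congr 1
    simp [List.length_dropLast] at hjlt
    omega
  rw [htake, zero_add]
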